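-- pv_equiv track=rewrite | github.com/ThomasLe1902/TranscriptAssistant | services/transcript.py | to_ms_sbv
-- ===== SOURCE A (Python) =====
-- from typing import List, Dict, Any
--
-- def to_ms_sbv(lines: List[str]) -> List[Dict[str, str]]:
--     """
--     Parse SBV format thành list các dict chứa timestamp và text
--     Giữ nguyên format timestamp gốc
--     """
--     subtitles = []
--     i = 0
--
--     while i < len(lines):
--         line = lines[i].strip()
--         if ',' in line:
--             # Chỉ split dấu phẩy đầu tiên (giữa timestamp)
--             parts = line.split(',', 1)
--             if len(parts) == 2:
--                 start_time = parts[0].strip()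
--                 end_time = parts[1].strip()
--             else:
--                 i += 1
--                 continue
--
--             # Giữ nguyên format timestamp gốc
--             start_ms = start_time
--             end_ms = end_time
--
--             text_lines = []
--             i += 1
--
--             while i < len(lines) and lines[i].strip():
--                 text_lines.append(lines[i].strip())
--                 i += 1
--             text = ' '.join(text_lines)
--
--             if text:  # Chỉ thêm nếu có text
--                 subtitles.append({
--                     'start_time': start_ms,
--                     'end_time': end_ms,
--                     'text': text
--                 })
--
--         i += 1
--
--     return subtitles
-- ===== SOURCE B (Python) =====
-- from typing import List, Dict, Any
--
-- def _parse_block(block):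
--     # block: maximal run of non-blank stripped lines
--     for j, line in enumerate(block):
--         if ',' in line:
--             start, end = line.split(',', 1)
--             text = ' '.join(block[j + 1:])
--             if text:
--                 return {'start_time': start.strip(),
--                         'end_time': end.strip(),
--                         'text': text}
--             return None
--     return None
--
-- def to_ms_sbv(lines: List[str]) -> List[Dict[str, str]]:
--     blocks = []
--     cur = []
--     for raw in lines:
--         s = raw.strip()
--         if s:
--             cur.append(s)
--         else:
--             if cur:
--                 blocks.append(cur)
--                 cur = []
--     if cur:
--         blocks.append(cur)
--     return [d for d in map(_parse_block, blocks) if d is not None]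
-- ===== Notes on version B (the rewrite author's own statement) =====
-- stated objective: alternative
-- what changed: Replaces A's single interleaved index scan (outer while with manual i, nested text-collecting while) by a two-phase pipeline: first partition the stripped lines into maximal non-blank blocks, then map each block independently to an optional subtitle dict (first comma line gives the timestamps, the remainder joined with ' ' gives the text) and keep the non-None results.
import Mathlib
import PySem

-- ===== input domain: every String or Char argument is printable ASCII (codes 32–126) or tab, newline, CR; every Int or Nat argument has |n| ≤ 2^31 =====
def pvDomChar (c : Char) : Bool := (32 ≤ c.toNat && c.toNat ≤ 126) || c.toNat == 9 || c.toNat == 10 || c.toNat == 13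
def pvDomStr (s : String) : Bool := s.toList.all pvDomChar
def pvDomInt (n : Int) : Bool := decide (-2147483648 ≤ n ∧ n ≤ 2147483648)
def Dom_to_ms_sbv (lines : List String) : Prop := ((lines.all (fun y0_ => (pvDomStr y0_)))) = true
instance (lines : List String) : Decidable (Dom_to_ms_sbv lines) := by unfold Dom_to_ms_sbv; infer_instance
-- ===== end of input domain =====

-- B replaces A's interleaved index scan by a partition-into-blocks pass followed by a per-block
-- mapping pass (objective: alternative decomposition; same asymptotic cost).

-- ===== PORT A =====
-- inner while: collects strip(lines[i]) while non-empty; returns (collected texts, remaining suffix)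
def to_ms_sbv_takeText : List String → List String × List String
  | [] => ([], [])
  | l :: ls =>
    if PySem.Str.strip l ≠ "" then
      let r := to_ms_sbv_takeText ls
      (PySem.Str.strip l :: r.1, r.2)
    else ([], l :: ls)

theorem to_ms_sbv_takeText_snd_len : ∀ ls : List String, (to_ms_sbv_takeText ls).2.length ≤ ls.length := by
  intro ls
  induction ls with
  | nil => simp [to_ms_sbv_takeText]
  | cons l ls ih =>
    simp only [to_ms_sbv_takeText]
    split
    · simpa using Nat.le_succ_of_le ih
    · simp

def to_ms_sbv_loop : List String → List (List (String × String))
  | [] => []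
  | l :: ls =>
    let line := PySem.Str.strip l
    if PySem.Str.isIn "," line then
      match PySem.Str.splitMax? line "," 1 with
      | some [p0, p1] =>
        let start_time := PySem.Str.strip p0
        let end_time := PySem.Str.strip p1
        let tr := to_ms_sbv_takeText ls
        let text := PySem.Str.join " " tr.1
        if text ≠ "" then
          [("start_time", start_time), ("end_time", end_time), ("text", text)] :: to_ms_sbv_loop tr.2.tail
        else
          to_ms_sbv_loop tr.2.tail
      | _ => to_ms_sbv_loop ls          -- len(parts) != 2: i += 1; continue (unreachable: ',' is in line)
    else to_ms_sbv_loop ls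
termination_by ls => ls.length
decreasing_by
  · have h1 := to_ms_sbv_takeText_snd_len ls
    simp; omega
  · have h1 := to_ms_sbv_takeText_snd_len ls
    simp; omega
  · simp
  · simp

def to_ms_sbv (lines : List String) : List (List (String × String)) :=
  to_ms_sbv_loop lines

-- ===== PORT B =====
-- pass 1: partition stripped lines into maximal non-blank blocks (fold with (current block, finished blocks))
def to_ms_sbv_alt_blockStep (st : List String × List (List String)) (l : String) : List String × List (List String) :=
  let s := PySem.Str.strip l
  if s ≠ "" then (st.1 ++ [s], st.2)
  else if st.1 ≠ [] then ([], st.2 ++ [st.1])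
  else st

def to_ms_sbv_alt_blocks (lines : List String) : List (List String) :=
  let st := lines.foldl to_ms_sbv_alt_blockStep ([], [])
  if st.1 ≠ [] then st.2 ++ [st.1] else st.2

-- first line of the block containing ',' together with the lines after it
def to_ms_sbv_alt_findComma : List String → Option (String × List String)
  | [] => none
  | x :: xs => if PySem.Str.isIn "," x then some (x, xs) else to_ms_sbv_alt_findComma xs

-- pass 2: one block → optionally one subtitle dict
def to_ms_sbv_alt_parseBlock (b : List String) : Option (List (String × String)) :=
  match to_ms_sbv_alt_findComma b with
  | none => none
  | some (x, rest) =>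
    match PySem.Str.splitMax? x "," 1 with
    | some [p0, p1] =>
      let text := PySem.Str.join " " rest
      if text ≠ "" then
        some [("start_time", PySem.Str.strip p0), ("end_time", PySem.Str.strip p1), ("text", text)]
      else none
    | _ => none
  
def to_ms_sbv_alt (lines : List String) : List (List (String × String)) :=
  (to_ms_sbv_alt_blocks lines).filterMap to_ms_sbv_alt_parseBlock

-- ===== PRECONDITION & SPEC =====
def Spec_to_ms_sbv (lines : List String) (out : List (List (String × String))) : Prop := out = to_ms_sbv_alt lines
instance (lines : List String) (out : List (List (String × String))) : Decidable (Spec_to_ms_sbv lines out) := by unfold Spec_to_ms_sbv; infer_instance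

-- ===== CLAIM (what is proved, stated in full; the proofs are below) =====
def Claim_equal_to_ms_sbv : Prop := ∀ (lines : List String), Dom_to_ms_sbv lines → Spec_to_ms_sbv lines (to_ms_sbv lines)

-- ===== LEMMAS AND PROOFS =====

-- recursive characterization of the block-building fold
def pvBlocksRec : List String → List String → List (List String)
  | cur, [] => if cur ≠ [] then [cur] else []
  | cur, l :: ls =>
    let s := PySem.Str.strip l
    if s ≠ "" then pvBlocksRec (cur ++ [s]) ls
    else if cur ≠ [] then cur :: pvBlocksRec [] ls
    else pvBlocksRec [] ls

theorem pvBlocks_foldl (ls : List String) : ∀ (cur : List String) (bs : List (List String)),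
    (let st := ls.foldl to_ms_sbv_alt_blockStep (cur, bs);
     if st.1 ≠ [] then st.2 ++ [st.1] else st.2) = bs ++ pvBlocksRec cur ls := by
  induction ls with
  | nil =>
    intro cur bs
    simp only [List.foldl, pvBlocksRec]
    split <;> simp
  | cons l ls ih =>
    intro cur bs
    simp only [List.foldl, pvBlocksRec, to_ms_sbv_alt_blockStep]
    by_cases hs : PySem.Str.strip l ≠ ""
    · rw [if_pos hs, if_pos hs]
      exact ih _ _
    · rw [if_neg hs, if_neg hs]
      by_cases hc : cur ≠ []
      · rw [if_pos hc, if_pos hc]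
        rw [ih [] (bs ++ [cur])]
        simp
      · rw [if_neg hc, if_neg hc]
        have : cur = [] := by simpa using hc
        subst this
        exact ih [] bs

theorem pvFindComma_commaFree_prefix : ∀ (c b : List String),
    (∀ x ∈ c, PySem.Str.isIn "," x = false) →
    to_ms_sbv_alt_findComma (c ++ b) = to_ms_sbv_alt_findComma b := by
  intro c
  induction c with
  | nil => intro b _; simp
  | cons x xs ih =>
    intro b h
    simp only [List.cons_append, to_ms_sbv_alt_findComma]
    rw [h x (by simp)]
    simp only [Bool.false_eq_true, if_false]
    exact ih b (fun y hy => h y (by simp [hy]))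

-- comma-free block parses to none
theorem pvParse_commaFree (c : List String) (h : ∀ x ∈ c, PySem.Str.isIn "," x = false) :
    to_ms_sbv_alt_parseBlock c = none := by
  unfold to_ms_sbv_alt_parseBlock
  have h0 := pvFindComma_commaFree_prefix c [] h
  simp only [List.append_nil] at h0
  rw [h0]
  rfl

-- a non-empty running block absorbs takeText's prefix
theorem pvBlocksRec_takeText : ∀ (ls : List String) (c : List String), c ≠ [] →
    pvBlocksRec c ls = (c ++ (to_ms_sbv_takeText ls).1) :: pvBlocksRec [] (to_ms_sbv_takeText ls).2.tail := by
  intro ls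
  induction ls with
  | nil =>
    intro c hc
    simp [pvBlocksRec, to_ms_sbv_takeText, hc]
  | cons l ls ih =>
    intro c hc
    simp only [pvBlocksRec, to_ms_sbv_takeText]
    by_cases hs : PySem.Str.strip l ≠ ""
    · rw [if_pos hs, if_pos hs, ih (c ++ [PySem.Str.strip l]) (by simp)]
      simp
    · rw [if_neg hs, if_neg hs, if_pos hc]
      simp

-- splitMax? with sep "," and maxsplit 1 yields exactly two pieces when ',' occurs
theorem pvGo_zero : ∀ (fuel : Nat) (l cur : List Char) (acc : List (List Char)),
    PySem.Chars.splitOnMax.go [','] fuel 0 l cur acc = ((cur.reverse ++ l) :: acc).reverse := by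
  intro fuel l cur acc
  cases fuel with
  | zero => rfl
  | succ n => cases l with
    | nil => simp [PySem.Chars.splitOnMax.go]
    | cons c rest => simp [PySem.Chars.splitOnMax.go]

theorem pvGo_one : ∀ (l : List Char) (fuel : Nat) (cur : List Char) (acc : List (List Char)),
    l.length < fuel → ',' ∈ l →
    ∃ a b, PySem.Chars.splitOnMax.go [','] fuel 1 l cur acc = acc.reverse ++ [a, b] := by
  intro l
  induction l with
  | nil => intro fuel cur acc _ hm; simp at hm
  | cons c rest ih =>
    intro fuel cur acc hf hm
    cases fuel with
    | zero => omega
    | succ n =>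
      simp only [PySem.Chars.splitOnMax.go]
      rw [if_neg (by decide : ¬(1 = 0))]
      by_cases hp : [','].isPrefixOf (c :: rest) = true
      · rw [if_pos hp, pvGo_zero]
        exact ⟨cur.reverse, List.drop [','].length (c :: rest), by simp⟩
      · have hc : ¬ (',' = c) := by
          intro h; apply hp; simp [List.isPrefixOf]; exact h
        have hm2 : ',' ∈ rest := by
          rw [List.mem_cons] at hm
          rcases hm with h | h
          · exact absurd h.symm (fun h2 => hc h2.symm)
          · exact h
        rw [if_neg hp]
        exact ih n (c :: cur) acc (by simpa using Nat.lt_of_succ_lt_succ hf) hm2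

theorem pvSplit_two (s : String) (h : PySem.Str.isIn "," s = true) :
    ∃ p0 p1, PySem.Str.splitMax? s "," 1 = some [p0, p1] := by
  have hmem : ',' ∈ s.toList := by
    have h2 : (",".toList) <:+: s.toList := (PySem.Str.isIn_iff_infix "," s).mp h
    have h3 : [','] <:+: s.toList := by simpa using h2
    exact h3.mem (by simp)
  unfold PySem.Str.splitMax? PySem.Chars.splitMax? PySem.Chars.splitOnMax
  obtain ⟨a, b, hab⟩ := pvGo_one s.toList (s.toList.length + 1) [] [] (by omega) hmem
  refine ⟨String.ofList a, String.ofList b, ?_⟩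
  have hsep : (",".toList) = [','] := rfl
  simp only [hsep, List.isEmpty_cons, if_false, Bool.false_eq_true]
  rw [if_neg (by omega)]
  simp only [Int.toNat_one]
  rw [hab]
  simp

-- one-step unfolding of A's loop, comma case, split already known
theorem pvLoop_cons_comma (l : String) (ls : List String) (p0 p1 : String)
    (hcm : PySem.Str.isIn "," (PySem.Str.strip l) = true)
    (hsp : PySem.Str.splitMax? (PySem.Str.strip l) "," 1 = some [p0, p1]) :
    to_ms_sbv_loop (l :: ls) =
      (if PySem.Str.join " " (to_ms_sbv_takeText ls).1 ≠ "" then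
        [("start_time", PySem.Str.strip p0), ("end_time", PySem.Str.strip p1),
         ("text", PySem.Str.join " " (to_ms_sbv_takeText ls).1)] ::
          to_ms_sbv_loop (to_ms_sbv_takeText ls).2.tail
      else to_ms_sbv_loop (to_ms_sbv_takeText ls).2.tail) := by
  rw [to_ms_sbv_loop]
  simp only [hcm, if_true, hsp]

-- one-step unfolding of A's loop, no-comma case
theorem pvLoop_cons_nocomma (l : String) (ls : List String)
    (hcm : PySem.Str.isIn "," (PySem.Str.strip l) = false) :
    to_ms_sbv_loop (l :: ls) = to_ms_sbv_loop ls := by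
  rw [to_ms_sbv_loop]
  simp only [hcm, Bool.false_eq_true, if_false]

-- the main bridge: A's loop over a suffix = B's per-block mapping, for any comma-free running block
theorem pvMain : ∀ (n : Nat) (ls cur : List String), ls.length ≤ n →
    (∀ x ∈ cur, PySem.Str.isIn "," x = false) →
    to_ms_sbv_loop ls = (pvBlocksRec cur ls).filterMap to_ms_sbv_alt_parseBlock := by
  intro n
  induction n with
  | zero =>
    intro ls cur hl hc
    have : ls = [] := List.eq_nil_of_length_eq_zero (Nat.le_zero.mp hl)
    subst this
    simp only [to_ms_sbv_loop, pvBlocksRec]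
    split
    · simp [pvParse_commaFree cur hc]
    · simp
  | succ n ih =>
    intro ls cur hl hc
    cases ls with
    | nil =>
      simp only [to_ms_sbv_loop, pvBlocksRec]
      split
      · simp [pvParse_commaFree cur hc]
      · simp
    | cons l ls =>
      by_cases hcm : PySem.Str.isIn "," (PySem.Str.strip l) = true
      · -- comma line: A emits (maybe) a subtitle and jumps past the block; B parses the block
        have hs : PySem.Str.strip l ≠ "" := by
          intro h0
          rw [h0] at hcm
          exact absurd hcm (by decide)
        obtain ⟨p0, p1, hsp⟩ := pvSplit_two (PySem.Str.strip l) hcm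
        have hblock := pvBlocksRec_takeText ls (cur ++ [PySem.Str.strip l]) (by simp)
        have hlt := to_ms_sbv_takeText_snd_len ls
        have htail : (to_ms_sbv_takeText ls).2.tail.length ≤ (to_ms_sbv_takeText ls).2.length := by
          cases (to_ms_sbv_takeText ls).2 <;> simp
        have hrec := ih (to_ms_sbv_takeText ls).2.tail [] (by simp at hl; omega) (by simp)
        have hparse : to_ms_sbv_alt_parseBlock ((cur ++ [PySem.Str.strip l]) ++ (to_ms_sbv_takeText ls).1) =
            (if PySem.Str.join " " (to_ms_sbv_takeText ls).1 ≠ "" then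
               some [("start_time", PySem.Str.strip p0), ("end_time", PySem.Str.strip p1),
                     ("text", PySem.Str.join " " (to_ms_sbv_takeText ls).1)]
             else none) := by
          unfold to_ms_sbv_alt_parseBlock
          have hb : (cur ++ [PySem.Str.strip l]) ++ (to_ms_sbv_takeText ls).1
               = cur ++ (PySem.Str.strip l :: (to_ms_sbv_takeText ls).1) := by simp
          rw [hb, pvFindComma_commaFree_prefix cur _ hc]
          simp only [to_ms_sbv_alt_findComma, hcm, if_true, hsp]
        rw [pvLoop_cons_comma l ls p0 p1 hcm hsp]
        simp only [pvBlocksRec]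
        rw [if_pos hs, hblock, List.filterMap_cons]
        rw [show (cur ++ [PySem.Str.strip l] ++ (to_ms_sbv_takeText ls).1)
              = ((cur ++ [PySem.Str.strip l]) ++ (to_ms_sbv_takeText ls).1) from by simp, hparse]
        by_cases ht : PySem.Str.join " " (to_ms_sbv_takeText ls).1 ≠ ""
        · rw [if_pos ht, if_pos ht, hrec]
        · rw [if_neg ht, if_neg ht, hrec]
      · -- no comma: A skips the line; B extends (or closes) the running block
        have hcm2 : PySem.Str.isIn "," (PySem.Str.strip l) = false := by
          simpa using hcm
        rw [pvLoop_cons_nocomma l ls hcm2]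
        simp only [pvBlocksRec]
        by_cases hs : PySem.Str.strip l ≠ ""
        · rw [if_pos hs]
          exact ih ls (cur ++ [PySem.Str.strip l]) (by simp at hl; omega)
            (by intro x hx
                rcases List.mem_append.mp hx with h | h
                · exact hc x h
                · simp at h; subst h; exact hcm2)
        · rw [if_neg hs]
          by_cases hcur : cur ≠ []
          · rw [if_pos hcur, List.filterMap_cons, pvParse_commaFree cur hc]
            exact ih ls [] (by simp at hl; omega) (by simp)
          · rw [if_neg hcur]
            exact ih ls [] (by simp at hl; omega) (by simp)

-- ===== VERDICT (by name: the statement is the Claim_ definition above) =====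
theorem to_ms_sbv_spec : Claim_equal_to_ms_sbv := by
  intro lines _
  unfold Spec_to_ms_sbv to_ms_sbv to_ms_sbv_alt to_ms_sbv_alt_blocks
  rw [pvBlocks_foldl lines [] []]
  simpa using pvMain lines.length lines [] le_rfl (by simp)
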